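-- pv_equiv track=rewrite | github.com/pdxgx/neoepiscope | neoepiscope/transcript.py | kmerize_peptide
-- ===== SOURCE A (Python) =====
-- def kmerize_peptide(peptide, min_size=8, max_size=11, editing_positions=[], ambiguous_positions=[]):
--     """Obtains subsequences of a peptide.
--     normal_peptide: normal peptide seq
--     min_size: minimum subsequence size
--     max_size: maximum subsequence size
--     editing_positions: positions where edits are made
--     ambiguous_positions: positions where edits are ambiguous
--     Return value: a list of tuples of peptide substrings and
--         Booleans indicating whether they contain RNA-editing and ambiguous
--         RNA-editing
--     """
--     peptide_size = len(peptide)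
--     return [
--         item
--         for sublist in [
--             [(peptide[i : i + size], True if [x for x in editing_positions if x in range(i, i+size)] else False, True if [x for x in ambiguous_positions if x in range(i, i+size)] else False) for i in range(peptide_size - size + 1)]
--             for size in range(min_size, max_size + 1)
--         ]
--         for item in sublist
--     ]
-- ===== SOURCE B (Python) =====
-- def kmerize_peptide(peptide, min_size=8, max_size=11, editing_positions=[], ambiguous_positions=[]):
--     """Prefix-count re-implementation: each window's edit/ambiguous flag is an
--     O(1) prefix-sum comparison instead of a rescan of the position lists."""
--     peptide_size = len(peptide)
--
--     def prefix_counts(positions):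
--         # marks[p+1] = number of occurrences of position p (0 <= p < peptide_size)
--         marks = [0] * (peptide_size + 1)
--         for x in positions:
--             if 0 <= x < peptide_size:
--                 marks[x + 1] += 1
--         # pref[j] = number of listed positions < j
--         pref = [0]
--         for m in marks[1:]:
--             pref.append(pref[-1] + m)
--         return pref
--
--     edit_pref = prefix_counts(editing_positions)
--     ambig_pref = prefix_counts(ambiguous_positions)
--
--     out = []
--     for size in range(min_size, max_size + 1):
--         for i in range(peptide_size - size + 1):
--             piece = peptide[i:i + size]
--             if size > 0:
--                 out.append((piece,
--                             edit_pref[i + size] > edit_pref[i],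
--                             ambig_pref[i + size] > ambig_pref[i]))
--             else:
--                 out.append((piece, False, False))
--     return out
-- ===== Notes on version B (the rewrite author's own statement) =====
-- stated objective: faster
-- what changed: B builds prefix-count arrays of the editing/ambiguous positions once, so each window's two flags become O(1) prefix-sum comparisons instead of A's rescan of both position lists for every window.
import Mathlib
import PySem

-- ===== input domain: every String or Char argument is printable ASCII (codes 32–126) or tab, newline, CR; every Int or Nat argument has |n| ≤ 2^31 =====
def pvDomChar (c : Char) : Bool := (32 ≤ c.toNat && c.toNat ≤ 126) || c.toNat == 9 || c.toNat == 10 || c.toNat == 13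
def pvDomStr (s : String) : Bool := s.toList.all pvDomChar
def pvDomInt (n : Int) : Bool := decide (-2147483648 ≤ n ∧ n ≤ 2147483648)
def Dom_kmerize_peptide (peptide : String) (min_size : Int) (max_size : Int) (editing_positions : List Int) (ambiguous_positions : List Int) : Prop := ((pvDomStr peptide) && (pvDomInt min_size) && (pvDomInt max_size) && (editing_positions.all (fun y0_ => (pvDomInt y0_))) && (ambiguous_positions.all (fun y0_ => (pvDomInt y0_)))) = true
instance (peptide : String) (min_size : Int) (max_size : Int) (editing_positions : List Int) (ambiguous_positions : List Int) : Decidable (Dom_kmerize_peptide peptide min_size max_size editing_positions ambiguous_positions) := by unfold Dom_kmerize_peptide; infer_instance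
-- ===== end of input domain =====

-- B replaces A's per-window rescan of the position lists with prefix-count arrays
-- built once, so each window's two flags are O(1) comparisons (objective: faster).

-- ===== PORT A =====
-- literal transliteration of A's nested comprehensions: list of per-size lists, flattened
def kmerize_peptide (peptide : String) (min_size : Int) (max_size : Int) (editing_positions : List Int) (ambiguous_positions : List Int) : List (String × Bool × Bool) :=
  let peptide_size := PySem.Str.len peptide
  (((PySem.List.pyRange min_size (max_size + 1)).map (fun size =>
      (PySem.List.pyRange 0 (peptide_size - size + 1)).map (fun i =>
        (PySem.Str.slice peptide (some i) (some (i + size)),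
         !(editing_positions.filter (fun x => (PySem.List.pyRange i (i + size)).contains x)).isEmpty,
         !(ambiguous_positions.filter (fun x => (PySem.List.pyRange i (i + size)).contains x)).isEmpty))))).flatten

-- ===== PORT B =====
-- Source B's prefix_counts helper: bump marks[x+1] per listed position, then running totals
def pvPrefixCounts (peptide_size : Nat) (positions : List Int) : List Int :=
  let marks := positions.foldl (fun m x =>
      if 0 ≤ x ∧ x < (peptide_size : Int) then m.set (x.toNat + 1) (m.getD (x.toNat + 1) 0 + 1) else m)
    (List.replicate (peptide_size + 1) 0)
  (marks.drop 1).foldl (fun pref m => pref ++ [pref.getLastD 0 + m]) [0]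

def kmerize_peptide_alt (peptide : String) (min_size : Int) (max_size : Int) (editing_positions : List Int) (ambiguous_positions : List Int) : List (String × Bool × Bool) :=
  let peptide_size := peptide.toList.length
  let edit_pref := pvPrefixCounts peptide_size editing_positions
  let ambig_pref := pvPrefixCounts peptide_size ambiguous_positions
  -- when 0 < size the pref indexes i and i+size are provably in range, so pyGetD's
  -- default is never taken (Python's list indexing never raises here)
  (PySem.List.pyRange min_size (max_size + 1)).foldl (fun out size =>
    (PySem.List.pyRange 0 ((peptide_size : Int) - size + 1)).foldl (fun out i =>
      if 0 < size then
        out ++ [(PySem.Str.slice peptide (some i) (some (i + size)),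
                 decide (PySem.List.pyGetD edit_pref i 0 < PySem.List.pyGetD edit_pref (i + size) 0),
                 decide (PySem.List.pyGetD ambig_pref i 0 < PySem.List.pyGetD ambig_pref (i + size) 0))]
      else
        out ++ [(PySem.Str.slice peptide (some i) (some (i + size)), false, false)]) out) []

-- ===== PRECONDITION & SPEC =====
def Spec_kmerize_peptide (peptide : String) (min_size : Int) (max_size : Int) (editing_positions : List Int) (ambiguous_positions : List Int) (out : List (String × Bool × Bool)) : Prop := out = kmerize_peptide_alt peptide min_size max_size editing_positions ambiguous_positions
instance (peptide : String) (min_size : Int) (max_size : Int) (editing_positions : List Int) (ambiguous_positions : List Int) (out : List (String × Bool × Bool)) : Decidable (Spec_kmerize_peptide peptide min_size max_size editing_positions ambiguous_positions out) := by unfold Spec_kmerize_peptide; infer_instance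

-- ===== CLAIM (what is proved, stated in full; the proofs are below) =====
def Claim_equal_kmerize_peptide : Prop := ∀ (peptide : String) (min_size : Int) (max_size : Int) (editing_positions : List Int) (ambiguous_positions : List Int), Dom_kmerize_peptide peptide min_size max_size editing_positions ambiguous_positions → Spec_kmerize_peptide peptide min_size max_size editing_positions ambiguous_positions (kmerize_peptide peptide min_size max_size editing_positions ambiguous_positions)

-- ===== LEMMAS AND PROOFS =====

-- number of listed positions strictly below j
def pvCnt (l : List Int) (j : Nat) : Nat := l.countP (fun x => decide (0 ≤ x ∧ x < (j : Int)))

-- running partial sums: pvPS a [m1, m2, …] = [a+m1, a+m1+m2, …]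
def pvPS (a : Int) : List Int → List Int
  | [] => []
  | m :: ms => (a + m) :: pvPS (a + m) ms

-- the marks-building step of pvPrefixCounts
def pvStep (n : Nat) (m : List Int) (x : Int) : List Int :=
  if 0 ≤ x ∧ x < (n : Int) then m.set (x.toNat + 1) (m.getD (x.toNat + 1) 0 + 1) else m

lemma pvStep_length (n : Nat) (m : List Int) (x : Int) : (pvStep n m x).length = m.length := by
  unfold pvStep; split <;> simp

lemma pvMarks_length (n : Nat) (l : List Int) (m : List Int) :
    (l.foldl (pvStep n) m).length = m.length := by
  induction l generalizing m with
  | nil => rfl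
  | cons x l ih => simp [List.foldl_cons, ih, pvStep_length]

lemma pvMarks_getD (n : Nat) (l : List Int) (m : List Int) (hm : m.length = n + 1) (q : Nat) :
    (l.foldl (pvStep n) m).getD q 0
      = m.getD q 0 + l.countP (fun x => decide (0 ≤ x ∧ x < (n : Int) ∧ x.toNat + 1 = q)) := by
  induction l generalizing m with
  | nil => simp
  | cons x l ih =>
      simp only [List.foldl_cons, List.countP_cons]
      rw [ih (pvStep n m x) (by rw [pvStep_length, hm])]
      unfold pvStep
      by_cases h : 0 ≤ x ∧ x < (n : Int)
      · simp only [if_pos h]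
        by_cases hq : x.toNat + 1 = q
        · subst hq
          have hlt : x.toNat + 1 < m.length := by omega
          simp [List.getD, hlt, h]
          omega
        · simp [List.getD, List.getElem?_set_ne (by omega : x.toNat + 1 ≠ q), h, hq]
      · have h' : ¬ (0 ≤ x ∧ x < (n : Int) ∧ x.toNat + 1 = q) := by tauto
        simp [if_neg h, h']

lemma pvScan (ms : List Int) : ∀ (pref : List Int), pref ≠ [] →
    ms.foldl (fun pref m => pref ++ [pref.getLastD 0 + m]) pref
      = pref ++ pvPS (pref.getLastD 0) ms := by
  induction ms with
  | nil => intro pref _; simp [pvPS]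
  | cons m ms ih =>
      intro pref hpref
      simp only [List.foldl_cons]
      rw [ih (pref ++ [pref.getLastD 0 + m]) (by simp)]
      simp [pvPS]

lemma pvPS_getD (ms : List Int) : ∀ (a : Int) (j : Nat), j < ms.length →
    (pvPS a ms).getD j 0 = a + ((ms.take (j + 1)).sum) := by
  induction ms with
  | nil => intro a j h; simp at h
  | cons m ms ih =>
      intro a j h
      cases j with
      | zero => simp [pvPS]
      | succ j =>
          simp only [pvPS, List.getD_cons_succ, List.take_succ_cons, List.sum_cons]
          rw [ih (a + m) j (by simpa using h)]
          ring

lemma pvCnt_succ (l : List Int) (n j : Nat) (hj : j < n) :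
    pvCnt l (j + 1)
      = pvCnt l j + l.countP (fun x => decide (0 ≤ x ∧ x < (n : Int) ∧ x.toNat + 1 = j + 1)) := by
  induction l with
  | nil => rfl
  | cons x l ih =>
      simp only [pvCnt, List.countP_cons, Nat.cast_add, Nat.cast_one] at ih ⊢
      rw [ih]
      simp only [decide_eq_true_eq]
      split_ifs <;> omega

lemma pvCnt_band (l : List Int) (i j : Nat) (h : i ≤ j) :
    pvCnt l j = pvCnt l i + l.countP (fun x => decide ((i : Int) ≤ x ∧ x < (j : Int))) := by
  induction l with
  | nil => rfl
  | cons x l ih =>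
      simp only [pvCnt, List.countP_cons] at ih ⊢
      rw [ih]
      simp only [decide_eq_true_eq]
      split_ifs <;> omega

lemma pvSumseg (n : Nat) (l : List Int) : ∀ (k : Nat), k ≤ n →
    (((l.foldl (pvStep n) (List.replicate (n + 1) (0 : Int))).drop 1).take k).sum = (pvCnt l k : Int) := by
  intro k
  induction k with
  | zero =>
      intro _
      have : pvCnt l 0 = 0 := by
        simp only [pvCnt, List.countP_eq_zero]
        intro x _
        simp only [decide_eq_true_eq, not_and, not_lt]
        omega
      simp [this]
  | succ k ih =>
      intro hk
      have hk' : k ≤ n := by omega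
      have hlen : (l.foldl (pvStep n) (List.replicate (n + 1) (0 : Int))).length = n + 1 := by
        rw [pvMarks_length]; simp
      have hklt : k < ((l.foldl (pvStep n) (List.replicate (n + 1) (0 : Int))).drop 1).length := by
        simp [hlen]; omega
      rw [List.take_add_one, List.sum_append, ih hk']
      have hget : ((l.foldl (pvStep n) (List.replicate (n + 1) (0 : Int))).drop 1)[k]?
          = some ((l.foldl (pvStep n) (List.replicate (n + 1) (0 : Int))).getD (1 + k) 0) := by
        rw [List.getElem?_drop]
        rw [List.getElem?_eq_getElem (by omega)]
        simp [List.getD, List.getElem?_eq_getElem (by omega : 1 + k < (l.foldl (pvStep n) (List.replicate (n + 1) (0 : Int))).length)]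
      rw [hget]
      rw [pvMarks_getD n l _ (by simp) (1 + k)]
      rw [List.getD_replicate (0 : Int) (by omega)]
      rw [pvCnt_succ l n k (by omega)]
      have heq : (1 : Nat) + k = k + 1 := by omega
      rw [heq]
      push_cast
      simp

lemma pvPrefixCounts_getD (n : Nat) (l : List Int) (j : Nat) (hj : j ≤ n) :
    (pvPrefixCounts n l).getD j 0 = (pvCnt l j : Int) := by
  unfold pvPrefixCounts
  show (((l.foldl (pvStep n) (List.replicate (n + 1) (0 : Int))).drop 1).foldl
      (fun pref m => pref ++ [pref.getLastD 0 + m]) [0]).getD j 0 = _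
  rw [pvScan _ [0] (by simp)]
  have h0 : List.getLastD [0] (0 : Int) = 0 := rfl
  rw [h0]
  cases j with
  | zero =>
      have : pvCnt l 0 = 0 := by
        simp only [pvCnt, List.countP_eq_zero]
        intro x _
        simp only [decide_eq_true_eq, not_and, not_lt]
        omega
      simp [this]
  | succ j =>
      have hlen : (l.foldl (pvStep n) (List.replicate (n + 1) (0 : Int))).length = n + 1 := by
        rw [pvMarks_length]; simp
      have hjlt : j < ((l.foldl (pvStep n) (List.replicate (n + 1) (0 : Int))).drop 1).length := by
        simp [hlen]; omega
      rw [List.singleton_append, List.getD_cons_succ]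
      rw [pvPS_getD _ 0 j hjlt]
      rw [pvSumseg n l (j + 1) hj]
      ring

-- generic shapes for B's two nested loops
lemma pvFoldlAppendOf {α β : Type} (inner : List β → α → List β) (G : α → List β)
    (h : ∀ out x, inner out x = out ++ G x) : ∀ (l : List α) (out : List β),
    l.foldl inner out = out ++ (l.map G).flatten := by
  intro l
  induction l with
  | nil => intro out; simp
  | cons x l ih => intro out; rw [List.foldl_cons, h, ih]; simp

lemma pvFoldIf {α β : Type} (c : Prop) [Decidable c] (f g : α → β) (l : List α) (out : List β) :
    l.foldl (fun out x => if c then out ++ [f x] else out ++ [g x]) out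
      = out ++ l.map (fun x => if c then f x else g x) := by
  by_cases h : c
  · simp only [if_pos h]; exact PySem.List.foldl_append_singleton_eq_map f l out
  · simp only [if_neg h]; exact PySem.List.foldl_append_singleton_eq_map g l out

-- per-window flag equality: A's rescan of the position list equals B's prefix comparison
lemma pvFlag (n : Nat) (l : List Int) (i size : Int) (h0 : 0 ≤ i) (hs : 0 < size)
    (hn : i + size ≤ (n : Int)) :
    (!(l.filter (fun x => (PySem.List.pyRange i (i + size)).contains x)).isEmpty)
      = decide (PySem.List.pyGetD (pvPrefixCounts n l) i 0
          < PySem.List.pyGetD (pvPrefixCounts n l) (i + size) 0) := by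
  rw [PySem.List.pyGetD_of_nonneg _ _ h0, PySem.List.pyGetD_of_nonneg _ _ (by omega)]
  rw [pvPrefixCounts_getD n l i.toNat (by omega), pvPrefixCounts_getD n l (i + size).toNat (by omega)]
  rw [Bool.eq_iff_iff]
  rw [pvCnt_band l i.toNat (i + size).toNat (by omega)]
  simp only [Bool.not_eq_true', List.isEmpty_eq_false_iff_exists_mem, List.mem_filter,
    List.contains_iff_mem, PySem.List.mem_pyRange_one, decide_eq_true_eq]
  push_cast [Int.toNat_of_nonneg h0, Int.toNat_of_nonneg (show (0:Int) ≤ i + size by omega)]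
  rw [show ∀ a b : Int, (a < a + b ↔ 0 < b) from by intros; omega]
  simp only [Int.natCast_pos, List.countP_pos_iff, decide_eq_true_eq]

-- ===== VERDICT (by name: the statement is the Claim_ definition above) =====
theorem kmerize_peptide_spec : Claim_equal_kmerize_peptide := by
  intro peptide min_size max_size editing_positions ambiguous_positions _
  unfold Spec_kmerize_peptide kmerize_peptide kmerize_peptide_alt
  simp only [PySem.Str.len_eq]
  rw [pvFoldlAppendOf _
      (fun size => (PySem.List.pyRange 0 ((peptide.toList.length : Int) - size + 1)).map
        (fun i => if 0 < size then
            (PySem.Str.slice peptide (some i) (some (i + size)),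
             decide (PySem.List.pyGetD (pvPrefixCounts peptide.toList.length editing_positions) i 0
               < PySem.List.pyGetD (pvPrefixCounts peptide.toList.length editing_positions) (i + size) 0),
             decide (PySem.List.pyGetD (pvPrefixCounts peptide.toList.length ambiguous_positions) i 0
               < PySem.List.pyGetD (pvPrefixCounts peptide.toList.length ambiguous_positions) (i + size) 0))
          else (PySem.Str.slice peptide (some i) (some (i + size)), false, false)))
      (fun out size => pvFoldIf _ _ _ _ out)]
  rw [List.nil_append]
  apply congrArg List.flatten
  apply List.map_congr_left
  intro size _
  apply List.map_congr_left
  intro i hi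
  rw [PySem.List.mem_pyRange_one] at hi
  by_cases hs : 0 < size
  · rw [if_pos hs]
    have h1 := pvFlag peptide.toList.length editing_positions i size hi.1 hs (by omega)
    have h2 := pvFlag peptide.toList.length ambiguous_positions i size hi.1 hs (by omega)
    rw [h1, h2]
  · rw [if_neg hs]
    have hf : ∀ (L : List Int),
        L.filter (fun x => (PySem.List.pyRange i (i + size)).contains x) = [] := by
      intro L
      rw [List.filter_eq_nil_iff]
      intro x _
      simp only [Bool.not_eq_true]
      rw [Bool.eq_false_iff]
      intro hcon
      have := PySem.List.mem_pyRange_one.mp (List.contains_iff_mem.mp hcon)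
      omega
    rw [hf, hf]
    simp
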